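-- pv_equiv track=rewrite | github.com/filipelsilva/Advent-of-Code | 2020/day02/res_pt1.py | parse
-- ===== SOURCE A (Python) =====
-- def parse(password):
--     i = 0
--     minimum = 0
--     maximum = 0
--     while (password[i] != "-"):
--         minimum = minimum * 10 + int(password[i])
--         i += 1
--     i += 1
--     while (password[i] != " "):
--         maximum = maximum * 10 + int(password[i])
--         i += 1
--     i += 1
--     char = password[i]
--     passw = password[i+1:]
--     return minimum, maximum, char, passw
-- ===== SOURCE B (Python) =====
-- def num(digits):
--     n = 0
--     for c in digits:
--         n = 10 * n + ord(c) - 48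
--     return n
--
--
-- def parse(password):
--     dash = password.index("-")
--     space = password.index(" ", dash + 1)
--     return (num(password[:dash]), num(password[dash + 1:space]),
--             password[space + 1], password[space + 2:])
-- ===== Notes on version B (the rewrite author's own statement) =====
-- stated objective: simpler
-- what changed: Instead of one index cursor walking the string through two interleaved test-and-accumulate while loops with a per-character int() call, B locates the two delimiters with str.index, slices the string, and converts each digit slice in a single standalone fold (num).
import Mathlib
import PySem

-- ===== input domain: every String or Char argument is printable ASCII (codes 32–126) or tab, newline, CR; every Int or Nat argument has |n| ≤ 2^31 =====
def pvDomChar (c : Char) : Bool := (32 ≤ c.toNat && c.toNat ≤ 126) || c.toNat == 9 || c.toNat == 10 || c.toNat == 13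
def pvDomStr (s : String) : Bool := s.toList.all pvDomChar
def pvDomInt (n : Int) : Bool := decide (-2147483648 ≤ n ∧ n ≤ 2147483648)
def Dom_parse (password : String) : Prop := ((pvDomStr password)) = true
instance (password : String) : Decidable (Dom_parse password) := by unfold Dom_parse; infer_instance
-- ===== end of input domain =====

-- ===== PORT A =====
-- B locates the delimiters with index() and converts the digit slices in one fold each,
-- instead of A's single cursor interleaving the delimiter test with per-character int() calls (simpler decomposition).

-- int(password[i]) on a single char: a value for '0'..'9', ValueError (none) otherwise (exact on the ASCII domain)
def pyIntChar? (c : Char) : Option Int :=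
  if c.isDigit then some ((c.toNat : Int) - 48) else none

-- A's while loop: walk the chars, stop at `stop`, accumulate acc*10 + int(c); none = IndexError / ValueError
def parseScanA : List Char → Char → Int → Option (Int × List Char)
  | [], _, _ => none
  | c :: rest, stop, acc =>
    if c = stop then some (acc, rest)
    else
      match pyIntChar? c with
      | some d => parseScanA rest stop (acc * 10 + d)
      | none => none

def parse (password : String) : Int × Int × String × String :=
  match parseScanA password.toList '-' 0 with
  | none => (0, 0, "", "")          -- unreachable under Pre_parse (Python raises)
  | some (minimum, rest) =>
    match parseScanA rest ' ' 0 with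
    | none => (0, 0, "", "")        -- unreachable under Pre_parse (Python raises)
    | some (maximum, rest2) =>
      match rest2 with
      | [] => (0, 0, "", "")        -- unreachable under Pre_parse (Python raises)
      | c :: tail => (minimum, maximum, String.ofList [c], String.ofList tail)

-- ===== PORT B =====
-- num(digits): n = 0; for c in digits: n = 10*n + ord(c) - 48
def pvNum (digits : List Char) : Int :=
  digits.foldl (fun n c => 10 * n + (c.toNat : Int) - 48) 0

def parse_alt (password : String) : Int × Int × String × String :=
  let cs := password.toList
  let dash := PySem.Chars.find cs ['-']
  if dash = -1 then (0, 0, "", "")  -- unreachable under Pre_parse (index() raises)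
  else
    let space := PySem.Chars.findFrom cs [' '] (dash + 1)
    if space = -1 then (0, 0, "", "")  -- unreachable under Pre_parse (index() raises)
    else
      match PySem.List.pyGet? cs (space + 1) with
      | none => (0, 0, "", "")      -- unreachable under Pre_parse (IndexError)
      | some c =>
        (pvNum (PySem.List.slice cs none (some dash)),
         pvNum (PySem.List.slice cs (some (dash + 1)) (some space)),
         String.ofList [c],
         String.ofList (PySem.List.slice cs (some (space + 2)) none))

-- ===== PRECONDITION & SPEC =====
-- Pre_parse: exactly the inputs where the Python A returns — a (possibly empty) digit run, a dash,
-- a digit run, a space, and at least one more character (elsewhere A raises IndexError or ValueError).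
def Pre_parse (password : String) : Prop :=
  ∃ i < password.toList.length, ∃ j < password.toList.length,
    i < j ∧ j + 1 < password.toList.length ∧
    password.toList[i]? = some '-' ∧ password.toList[j]? = some ' ' ∧
    (∀ k < i, (password.toList.getD k ' ').isDigit) ∧
    (∀ k < j, i < k → (password.toList.getD k ' ').isDigit)
instance (password : String) : Decidable (Pre_parse password) := by unfold Pre_parse; infer_instance

def pvWitness_parse : String := "1-3 a: abcde"

def Spec_parse (password : String) (out : Int × Int × String × String) : Prop := out = parse_alt password
instance (password : String) (out : Int × Int × String × String) : Decidable (Spec_parse password out) := by unfold Spec_parse; infer_instance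

-- ===== CLAIM (what is proved, stated in full; the proofs are below) =====
def Claim_equal_parse : Prop := ∀ (password : String), Dom_parse password → Pre_parse password → Spec_parse password (parse password)

-- ===== LEMMAS AND PROOFS =====

-- A's digit-accumulating while loop over ds ++ stop :: rest is B's num fold over ds
lemma scanA_eval (ds : List Char) (rest : List Char) (stop : Char) (acc : Int)
    (hstop : stop.isDigit = false) (hds : ∀ c ∈ ds, c.isDigit) :
    parseScanA (ds ++ stop :: rest) stop acc
      = some (ds.foldl (fun n c => 10 * n + (c.toNat : Int) - 48) acc, rest) := by
  induction ds generalizing acc with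
  | nil => simp [parseScanA]
  | cons c t ih =>
    have hc : c.isDigit := hds c (by simp)
    have hne : c ≠ stop := by rintro rfl; rw [hc] at hstop; cases hstop
    have h10 : acc * 10 + ((c.toNat : Int) - 48) = 10 * acc + (c.toNat : Int) - 48 := by ring
    simp only [List.cons_append, parseScanA, if_neg hne, pyIntChar?, hc, if_pos, List.foldl_cons]
    rw [h10, ih _ (fun d hd => hds d (by simp [hd]))]

-- first occurrence of a single character that does not occur in the prefix l
lemma find_singleton (x : Char) (l r : List Char) (h : x ∉ l) :
    PySem.Chars.find (l ++ x :: r) [x] = (l.length : Int) := by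
  set s := l ++ x :: r with hs
  have hinf : [x] <:+: s := ⟨l, r, by simp [hs]⟩
  have hne : PySem.Chars.find s [x] ≠ -1 := (PySem.Chars.find_ne_neg_one_iff s [x]).2 hinf
  have h0 : PySem.Chars.findFrom s [x] ((0 : Nat) : Int) = PySem.Chars.find s [x] := by simp
  have hspec := PySem.Chars.findFrom_natCast_spec s [x] 0 (Nat.zero_le _) (by rw [h0]; exact hne)
  rw [h0] at hspec
  obtain ⟨hge, hpre, hmin⟩ := hspec
  set m := (PySem.Chars.find s [x]).toNat with hm
  have hgx : s[m]? = some x := by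
    obtain ⟨t, ht⟩ := hpre
    rw [← List.head?_drop, ← ht]; simp
  have hub : m ≤ l.length := by
    by_contra hlt
    exact hmin l.length (Nat.zero_le _) (by omega) ⟨r, by simp [hs]⟩
  have hlb : ¬ m < l.length := by
    intro hlt
    have hg : s[m]? = l[m]? := by rw [hs]; exact List.getElem?_append_left hlt
    rw [hg] at hgx
    exact h (List.mem_of_getElem? hgx)
  omega

lemma parse_eq (password : String) (hpre : Pre_parse password) :
    parse password = parse_alt password := by
  obtain ⟨i, hi, j, hj, hij, hj1, hgi, hgj, hdig1, hdig2⟩ := hpre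
  set cs := password.toList with hcs
  set ds := cs.take i with hds
  set es := (cs.drop (i+1)).take (j - (i+1)) with hes
  have hcj1 : j + 1 < cs.length := hj1
  obtain ⟨c, hc⟩ : ∃ c, cs[j+1]? = some c := ⟨cs[j+1]'hcj1, List.getElem?_eq_getElem hcj1⟩
  set tail := cs.drop (j+2) with htail
  have hcival : cs[i] = '-' := by
    have := List.getElem?_eq_getElem hi; rw [hgi] at this; exact (Option.some.inj this).symm
  have hcjval : cs[j] = ' ' := by
    have := List.getElem?_eq_getElem hj; rw [hgj] at this; exact (Option.some.inj this).symm
  have hcj1val : cs[j+1]'hcj1 = c := by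
    have := List.getElem?_eq_getElem hcj1; rw [hc] at this; exact (Option.some.inj this).symm
  -- decomposition
  have e5 : cs.drop (j+1) = c :: tail := by
    rw [List.drop_eq_getElem_cons hcj1, hcj1val]
  have e4 : cs.drop j = ' ' :: c :: tail := by
    rw [List.drop_eq_getElem_cons hj, hcjval, e5]
  have e3 : cs.drop (i+1) = es ++ ' ' :: c :: tail := by
    conv_lhs => rw [← List.take_append_drop (j-(i+1)) (cs.drop (i+1))]
    rw [List.drop_drop, ← hes]
    congr 1
    rw [show i + 1 + (j - (i+1)) = j by omega, e4]
  have e2 : cs.drop i = '-' :: (es ++ ' ' :: c :: tail) := by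
    rw [List.drop_eq_getElem_cons hi, hcival, e3]
  have hsplit : cs = ds ++ '-' :: (es ++ ' ' :: c :: tail) := by
    conv_lhs => rw [← List.take_append_drop i cs]
    rw [← hds, e2]
  -- lengths
  have hlds : ds.length = i := by rw [hds, List.length_take]; omega
  have hles : es.length = j - (i+1) := by
    rw [hes, List.length_take, List.length_drop]; omega
  -- digit facts
  have hds_dig : ∀ d ∈ ds, d.isDigit := by
    intro d hd
    obtain ⟨k, hk, hkd⟩ := List.getElem_of_mem hd
    have hki : k < i := by rw [hlds] at hk; exact hk
    have : ds[k]'hk = cs[k]'(by omega) := by simp only [hds, List.getElem_take]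
    have hgd := hdig1 k hki
    rw [List.getD_eq_getElem?_getD, List.getElem?_eq_getElem (by omega : k < cs.length)] at hgd
    simpa [← hkd, this] using hgd
  have hes_dig : ∀ d ∈ es, d.isDigit := by
    intro d hd
    obtain ⟨k, hk, hkd⟩ := List.getElem_of_mem hd
    have hkj : i + 1 + k < j := by rw [hles] at hk; omega
    have : es[k]'hk = cs[i+1+k]'(by omega) := by
      simp only [hes, List.getElem_take, List.getElem_drop]
    have hgd := hdig2 (i+1+k) hkj (by omega)
    rw [List.getD_eq_getElem?_getD, List.getElem?_eq_getElem (by omega : i+1+k < cs.length)] at hgd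
    simpa [← hkd, this] using hgd
  have hdash_not : ('-' : Char) ∉ ds := fun hmem => by
    have := hds_dig _ hmem; simp [Char.isDigit] at this
  have hsp_not : (' ' : Char) ∉ es := fun hmem => by
    have := hes_dig _ hmem; simp [Char.isDigit] at this
  -- A side
  have hA : parse password = (pvNum ds, pvNum es, String.ofList [c], String.ofList tail) := by
    unfold parse
    rw [← hcs, hsplit, scanA_eval ds _ '-' 0 (by decide) hds_dig]
    dsimp only
    rw [scanA_eval es (c :: tail) ' ' 0 (by decide) hes_dig]
    dsimp only [pvNum]
  -- B side
  have hfind : PySem.Chars.find cs ['-'] = (i : Int) := by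
    rw [hsplit, find_singleton '-' ds _ hdash_not, hlds]
  have hfindFrom : PySem.Chars.findFrom cs [' '] ((i:Int)+1) = (j : Int) := by
    have hcast : ((i:Int)+1) = ((i+1 : Nat) : Int) := by push_cast; ring
    rw [hcast, PySem.Chars.findFrom_natCast cs [' '] (i+1) (by omega), e3,
        find_singleton ' ' es (c :: tail) hsp_not]
    rw [if_neg (by omega : ¬ ((es.length : Int) = -1))]
    push_cast [hles]; omega
  have hB : parse_alt password = (pvNum ds, pvNum es, String.ofList [c], String.ofList tail) := by
    unfold parse_alt
    dsimp only
    rw [← hcs, hfind]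
    rw [if_neg (by omega : ¬ ((i : Int) = -1)), hfindFrom]
    rw [if_neg (by omega : ¬ ((j : Int) = -1))]
    have hg : PySem.List.pyGet? cs ((j:Int)+1) = some c := by
      rw [show ((j:Int)+1) = ((j+1 : Nat) : Int) by push_cast; ring, PySem.List.pyGet?_natCast, hc]
    rw [hg]
    have hs1 : PySem.List.slice cs none (some (i:Int)) = ds := by
      rw [PySem.List.slice_to_natCast, hds]
    have hs2 : PySem.List.slice cs (some ((i:Int)+1)) (some (j:Int)) = es := by
      rw [show ((i:Int)+1) = ((i+1 : Nat) : Int) by push_cast; ring, PySem.List.slice_natCast, hes]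
    have hs3 : PySem.List.slice cs (some ((j:Int)+2)) none = tail := by
      rw [show ((j:Int)+2) = ((j+2 : Nat) : Int) by push_cast; ring, PySem.List.slice_from_natCast, htail]
    rw [hs1, hs2, hs3]
  rw [hA, hB]

-- ===== VERDICT (by name: the statement is the Claim_ definition above) =====
theorem parse_spec : Claim_equal_parse := by
  intro password _hdom hpre
  show parse password = parse_alt password
  exact parse_eq password hpre
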